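-- pv_equiv track=rewrite | github.com/DanielAndrews43/xkcd-1205 | main.py | usable_numbers
-- ===== SOURCE A (Python) =====
-- converter = {
--     "s": 1,
--     "m": 60,
--     "h": 60*60,
--     "d": 60*60*8,
--     "M": 60*60*8*21,
--     "y": 60*60*8*365,
-- }
--
-- unit_order = ['seconds', 'minutes', 'hours', 'days', 'months', 'years']
--
-- unit_key = ['s', 'm', 'h', 'd', 'M', 'y']
--
-- def usable_numbers(time):
--     """
--     Calculates the value and unit that is most easiy human readable for total time spent
--
--     time: int representing total number of seconds
--
--     returns
--         value: the number representing time
--         unit: the unit that value is represented in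
--     """
--     curr_val = time
--     index = 0
--
--     while index+1 < len(unit_key):
--         unit_test = converter[unit_key[index+1]]
--         if time // unit_test < 1:
--             break
--         index += 1
--
--     return time//converter[unit_key[index]], unit_order[index]
-- ===== SOURCE B (Python) =====
-- unit_order = ['seconds', 'minutes', 'hours', 'days', 'months', 'years']
--
-- # ascending converter values: s, m, h, d, M, y
-- thresholds = [1, 60, 3600, 28800, 604800, 10512000]
--
-- def usable_numbers(time):
--     """Binary-search the sorted thresholds table for the largest unit <= time."""
--     lo, hi = 0, len(thresholds)
--     while lo < hi:                      # hand-written bisect_right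
--         mid = (lo + hi) // 2
--         if time < thresholds[mid]:
--             hi = mid
--         else:
--             lo = mid + 1
--     idx = max(0, lo - 1)                # clamp: times < 1 second stay 'seconds'
--     return time // thresholds[idx], unit_order[idx]
-- ===== Notes on version B (the rewrite author's own statement) =====
-- stated objective: alternative
-- what changed: Replaced A's forward linear scan through the unit dict (advancing an index while floor-dividing by the next unit) by a hand-written bisect_right binary search over a sorted thresholds list, clamped so sub-second and negative times still map to seconds.
import Mathlib
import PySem

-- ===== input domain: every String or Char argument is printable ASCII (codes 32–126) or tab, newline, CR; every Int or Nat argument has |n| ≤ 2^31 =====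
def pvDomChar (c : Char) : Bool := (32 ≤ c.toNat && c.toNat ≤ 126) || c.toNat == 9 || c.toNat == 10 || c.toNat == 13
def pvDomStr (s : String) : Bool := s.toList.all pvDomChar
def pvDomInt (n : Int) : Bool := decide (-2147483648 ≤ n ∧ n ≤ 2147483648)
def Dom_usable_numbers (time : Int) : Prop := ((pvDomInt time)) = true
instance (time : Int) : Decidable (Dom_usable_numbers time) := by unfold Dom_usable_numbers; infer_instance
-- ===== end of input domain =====

-- B replaces A's forward linear scan over the unit table by a binary search (hand-written
-- bisect_right) over the ascending thresholds list; objective: alternative algorithm.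

-- ===== PORT A =====
def converterD : PySem.Dict String Int :=
  PySem.Dict.ofList [("s", 1), ("m", 60), ("h", 3600), ("d", 28800), ("M", 604800), ("y", 10512000)]

def unit_orderL : List String := ["seconds", "minutes", "hours", "days", "months", "years"]

def unit_keyL : List String := ["s", "m", "h", "d", "M", "y"]

-- the 'while index+1 < len(unit_key)' loop; index stays in [0,5] so List.getD is exact here
def usableLoop (time : Int) (index : Nat) : Nat :=
  if index + 1 < unit_keyL.length then
    let unit_test := converterD.getD (unit_keyL.getD (index + 1) "") 0
    if PySem.Int.floordiv time unit_test < 1 then index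
    else usableLoop time (index + 1)
  else index
termination_by unit_keyL.length - index

def usable_numbers (time : Int) : Int × String :=
  let index := usableLoop time 0
  (PySem.Int.floordiv time (converterD.getD (unit_keyL.getD index "") 0),
   unit_orderL.getD index "")

-- ===== PORT B =====
def thresholdsL : List Int := [1, 60, 3600, 28800, 604800, 10512000]

-- the 'while lo < hi' hand-written bisect_right loop; lo, hi, mid stay in [0,6] so Nat // and List.getD are exact
def bisectLoop (time : Int) (lo hi : Nat) : Nat :=
  if lo < hi then
    let mid := (lo + hi) / 2
    if time < thresholdsL.getD mid 0 then bisectLoop time lo mid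
    else bisectLoop time (mid + 1) hi
  else lo
termination_by hi - lo

def usable_numbers_alt (time : Int) : Int × String :=
  let lo := bisectLoop time 0 thresholdsL.length
  -- Python: idx = max(0, lo - 1); lo : Nat, so Nat subtraction with max 0 gives the same clamp
  let idx := max 0 (lo - 1)
  (PySem.Int.floordiv time (thresholdsL.getD idx 0), unit_orderL.getD idx "")

-- ===== PRECONDITION & SPEC =====
def Spec_usable_numbers (time : Int) (out : Int × String) : Prop := out = usable_numbers_alt time
instance (time : Int) (out : Int × String) : Decidable (Spec_usable_numbers time out) := by unfold Spec_usable_numbers; infer_instance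

-- ===== CLAIM (what is proved, stated in full; the proofs are below) =====
def Claim_equal_usable_numbers : Prop := ∀ (time : Int), Dom_usable_numbers time → Spec_usable_numbers time (usable_numbers time)

-- ===== LEMMAS AND PROOFS =====
-- both loops land on the same region index, characterised by nested ifs on the thresholds
def regionIdx (time : Int) : Nat :=
  if time < 60 then 0 else if time < 3600 then 1 else if time < 28800 then 2
  else if time < 604800 then 3 else if time < 10512000 then 4 else 5

-- the six converter lookups, evaluated once (kernel computation on the literal dict)
lemma conv_s : converterD.getD "s" 0 = 1 := by decide
lemma conv_m : converterD.getD "m" 0 = 60 := by decide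
lemma conv_h : converterD.getD "h" 0 = 3600 := by decide
lemma conv_d : converterD.getD "d" 0 = 28800 := by decide
lemma conv_M : converterD.getD "M" 0 = 604800 := by decide
lemma conv_y : converterD.getD "y" 0 = 10512000 := by decide

lemma usableLoop_eq (time : Int) : usableLoop time 0 = regionIdx time := by
  unfold regionIdx
  split_ifs with h1 h2 h3 h4 h5 <;>
    · simp [usableLoop, unit_keyL, conv_m, conv_h, conv_d, conv_M, conv_y]
      try split_ifs
      all_goals omega

lemma bisectLoop_eq (time : Int) :
    max 0 (bisectLoop time 0 thresholdsL.length - 1) = regionIdx time := by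
  unfold regionIdx
  split_ifs with h1 h2 h3 h4 h5 <;>
    · simp [bisectLoop, thresholdsL]
      try split_ifs
      all_goals omega

-- ===== VERDICT (by name: the statement is the Claim_ definition above) =====
theorem usable_numbers_spec : Claim_equal_usable_numbers := by
  intro time _
  unfold Spec_usable_numbers
  simp only [usable_numbers, usable_numbers_alt, usableLoop_eq, bisectLoop_eq]
  unfold regionIdx
  split_ifs <;>
    simp [unit_keyL, thresholdsL, conv_s, conv_m, conv_h, conv_d, conv_M, conv_y]
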